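-- pv_equiv track=rewrite | github.com/fabianvanrissenbeck/memclave-ime | opdiff.py | bitequal
-- ===== SOURCE A (Python) =====
-- def bitequal(ls, n_bits = 48):
--     res = ""
--
--     for i in range(n_bits):
--         bits = [(n >> i & 1) == 1 for n in ls]
--
--         if all(bits) or not any(bits):
--             res = "0" + res
--         else:
--             res = "1" + res
--
--     return int(res, 2)
-- ===== SOURCE B (Python) =====
-- def bitequal(ls, n_bits=48):
--     if not ls:
--         return 0
--     acc_or = acc_and = ls[0]
--     for n in ls[1:]:
--         acc_or |= n
--         acc_and &= n
--     return (acc_or ^ acc_and) & ((1 << n_bits) - 1)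
-- ===== Notes on version B (the rewrite author's own statement) =====
-- stated objective: faster
-- what changed: A builds a binary string digit by digit, scanning the whole list once per bit position (n_bits passes) and finally parses the string with int(res,2); B makes one pass over the list computing the OR and the AND of all elements and returns (OR ^ AND) masked to n_bits bits.
import Mathlib
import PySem

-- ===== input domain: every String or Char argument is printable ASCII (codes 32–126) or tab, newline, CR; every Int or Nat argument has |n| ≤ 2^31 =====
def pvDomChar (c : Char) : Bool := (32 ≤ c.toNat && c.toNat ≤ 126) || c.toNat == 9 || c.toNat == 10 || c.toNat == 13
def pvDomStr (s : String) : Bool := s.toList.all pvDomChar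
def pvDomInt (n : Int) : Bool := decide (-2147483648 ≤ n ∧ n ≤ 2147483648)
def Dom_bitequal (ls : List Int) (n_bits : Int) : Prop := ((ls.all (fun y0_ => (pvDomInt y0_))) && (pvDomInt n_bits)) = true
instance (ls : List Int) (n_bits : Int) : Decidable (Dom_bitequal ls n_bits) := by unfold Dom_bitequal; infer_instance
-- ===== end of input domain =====

-- B replaces A's per-bit scan of the list (building a binary string, then int(res,2)) by a
-- single pass computing the OR and AND of all elements, returning (OR ^ AND) masked to n_bits bits (faster).


-- ===== PORT A =====
-- int(res, 2) ported by hand (PySem.Int.ofCharsBase? covers it but its helpers are private):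
-- exact on the strings res ever holds, i.e. nonempty strings of '0'/'1' characters only.
def pvIntOfBin (cs : List Char) : Int :=
  cs.foldl (fun acc c => 2 * acc + (if c = '1' then 1 else 0)) 0

-- loop body of A, prepending one character per bit position (res is a string, kept as List Char);
-- i comes from range(n_bits) so i ≥ 0 and the shift amount i.toNat is exact
def pvStepA (ls : List Int) (res : List Char) (i : Int) : List Char :=
  let bits := ls.map (fun n : Int => PySem.Int.band (n >>> i.toNat) 1 == 1)
  if bits.all (fun b => b) || !(bits.any (fun b => b)) then '0' :: res else '1' :: res

def bitequal (ls : List Int) (n_bits : Int) : Int :=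
  let res := (PySem.List.pyRange 0 n_bits).foldl (pvStepA ls) ([] : List Char)
  pvIntOfBin res

-- ===== PORT B =====
def bitequal_alt (ls : List Int) (n_bits : Int) : Int :=
  match ls with
  | [] => 0
  | x :: rest =>
    let oa := rest.foldl (fun (p : Int × Int) n => (PySem.Int.bor p.1 n, PySem.Int.band p.2 n)) (x, x)
    PySem.Int.band (PySem.Int.bxor oa.1 oa.2) (((1 : Int) <<< n_bits.toNat) - 1)

-- ===== PRECONDITION & SPEC =====
-- Pre_ excludes exactly n_bits ≤ 0, where A raises ValueError: the loop runs zero times and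
-- int("", 2) fails (and for n_bits < 0 B's 1 << n_bits raises as well).
def Pre_bitequal (ls : List Int) (n_bits : Int) : Prop := 1 ≤ n_bits
instance (ls : List Int) (n_bits : Int) : Decidable (Pre_bitequal ls n_bits) := by unfold Pre_bitequal; infer_instance
def pvWitness_bitequal : List Int × Int := ([3, 5, -6], 4)

def Spec_bitequal (ls : List Int) (n_bits : Int) (out : Int) : Prop := out = bitequal_alt ls n_bits
instance (ls : List Int) (n_bits : Int) (out : Int) : Decidable (Spec_bitequal ls n_bits out) := by unfold Spec_bitequal; infer_instance

-- ===== CLAIM (what is proved, stated in full; the proofs are below) =====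
def Claim_equal_bitequal : Prop := ∀ (ls : List Int) (n_bits : Int), Dom_bitequal ls n_bits → Pre_bitequal ls n_bits → Spec_bitequal ls n_bits (bitequal ls n_bits)
-- ===== LEMMAS AND PROOFS =====

-- bit i of the integer x, in Python's infinite two's-complement reading
def pvBit (x : Int) (i : Nat) : Bool := x / 2 ^ i % 2 == 1

theorem pv_cast_div_mod (m i : Nat) : ((m : Int) / 2 ^ i % 2) = ((m / 2 ^ i % 2 : Nat) : Int) := by
  push_cast; ring

-- floor-division/mod of -x-1 (Python's ~x)
theorem pv_neg_ediv (x N : Int) (h : 0 < N) :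
    (-x - 1) / N = -(x / N) - 1 ∧ (-x - 1) % N = N - 1 - x % N := by
  have h1 := Int.ediv_add_emod x N
  have h2 := Int.emod_nonneg x (by omega : N ≠ 0)
  have h3 := Int.emod_lt_of_pos x h
  exact (Int.ediv_emod_unique (a := -x - 1) (b := N) (r := N - 1 - x % N)
    (q := -(x / N) - 1) h).mpr ⟨by linear_combination (-1 : ℤ) * h1, by omega, by omega⟩

theorem pvBit_natCast (m : Nat) (i : Nat) : pvBit (m : Int) i = m.testBit i := by
  rw [pvBit, pv_cast_div_mod, Nat.testBit_eq_decide_div_mod_eq]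
  rcases Nat.mod_two_eq_zero_or_one (m / 2 ^ i) with hm | hm <;> simp [hm]

theorem pvBit_neg (m : Nat) (i : Nat) : pvBit (-(m : Int) - 1) i = !m.testBit i := by
  have h1 : (0 : Int) < 2 ^ i := by positivity
  rw [pvBit, (pv_neg_ediv (m : Int) (2 ^ i) h1).1,
    show -((m : Int) / 2 ^ i) - 1 = -(((m : Int) / 2 ^ i)) - 1 from rfl,
    (pv_neg_ediv ((m : Int) / 2 ^ i) 2 (by omega)).2,
    pv_cast_div_mod, Nat.testBit_eq_decide_div_mod_eq]
  rcases Nat.mod_two_eq_zero_or_one (m / 2 ^ i) with hm | hm <;> simp [hm]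

-- bitwise-subset subtraction: if s's bits are a subset of a's, a - s = a ^^^ s
theorem pv_subset_sub : ∀ a : Nat, ∀ s : Nat, s &&& a = s → a - s = a ^^^ s := by
  intro a
  induction a using Nat.strong_induction_on with
  | _ a ih =>
    intro s h
    rcases Nat.eq_zero_or_pos a with ha | ha
    · subst ha; simp at h; simp [h]
    · have h2 : s / 2 &&& a / 2 = s / 2 := by
        have := congrArg (· / 2) h
        simpa [Nat.and_div_two] using this
      have ih2 := ih (a / 2) (by omega) (s / 2) h2
      have hle2 : s / 2 ≤ a / 2 := by
        have h3 : s / 2 &&& a / 2 ≤ a / 2 := Nat.and_le_right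
        rw [h2] at h3; exact h3
      have hmods : s % 2 ≤ a % 2 := by
        have t0 := Nat.testBit_and s a 0
        rw [h] at t0
        simp only [Nat.testBit_zero] at t0
        rcases Nat.mod_two_eq_zero_or_one s with hs | hs <;>
          rcases Nat.mod_two_eq_zero_or_one a with haa | haa <;>
            simp [hs, haa] at t0 ⊢ <;> omega
      have hxd : (a ^^^ s) / 2 = a / 2 ^^^ s / 2 := Nat.xor_div_two
      have hxm : (a ^^^ s) % 2 = a % 2 - s % 2 := by
        have t0 := Nat.testBit_xor a s 0
        simp only [Nat.testBit_zero] at t0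
        rcases Nat.mod_two_eq_zero_or_one s with hs | hs <;>
          rcases Nat.mod_two_eq_zero_or_one a with haa | haa <;>
            simp [hs, haa] at t0 ⊢ <;> omega
      have e1 := Nat.div_add_mod a 2
      have e2 := Nat.div_add_mod s 2
      have e3 := Nat.div_add_mod (a ^^^ s) 2
      omega

theorem pv_sub_and_eq_ldiff (a m : Nat) : a - (a &&& m) = a.ldiff m := by
  have hsub : (a &&& m) &&& a = a &&& m := by
    rw [Nat.and_comm (a &&& m) a, ← Nat.and_assoc, Nat.and_self]
  rw [pv_subset_sub a (a &&& m) hsub]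
  apply Nat.eq_of_testBit_eq
  intro i
  simp only [Nat.testBit_xor, Nat.testBit_and, Nat.testBit_ldiff]
  cases a.testBit i <;> cases m.testBit i <;> rfl

theorem pv_nonneg_form (a : Int) (h : 0 ≤ a) : ∃ m : Nat, a = (m : Int) := ⟨a.toNat, by omega⟩
theorem pv_neg_form (b : Int) (h : ¬ 0 ≤ b) : ∃ n : Nat, b = -(n : Int) - 1 := ⟨(-b - 1).toNat, by omega⟩

theorem pvBit_band (a b : Int) (i : Nat) :
    pvBit (PySem.Int.band a b) i = (pvBit a i && pvBit b i) := by
  unfold PySem.Int.band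
  by_cases ha : 0 ≤ a <;> by_cases hb : 0 ≤ b
  · obtain ⟨m, rfl⟩ := pv_nonneg_form a ha
    obtain ⟨n, rfl⟩ := pv_nonneg_form b hb
    simp [ha, hb, pvBit_natCast, Nat.testBit_and]
  · obtain ⟨m, rfl⟩ := pv_nonneg_form a ha
    obtain ⟨n, rfl⟩ := pv_neg_form b hb
    simp only [ha, hb, if_true, if_false, Int.toNat_natCast,
      show -(-(n : Int) - 1) - 1 = (n : Int) from by ring, pv_sub_and_eq_ldiff,
      pvBit_natCast, pvBit_neg, Nat.testBit_ldiff]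
  · obtain ⟨m, rfl⟩ := pv_neg_form a ha
    obtain ⟨n, rfl⟩ := pv_nonneg_form b hb
    simp only [ha, hb, if_true, if_false, Int.toNat_natCast,
      show -(-(m : Int) - 1) - 1 = (m : Int) from by ring, pv_sub_and_eq_ldiff,
      pvBit_natCast, pvBit_neg, Nat.testBit_ldiff]
    cases m.testBit i <;> cases n.testBit i <;> rfl
  · obtain ⟨m, rfl⟩ := pv_neg_form a ha
    obtain ⟨n, rfl⟩ := pv_neg_form b hb
    simp only [ha, hb, if_true, if_false, Int.toNat_natCast,
      show -(-(m : Int) - 1) - 1 = (m : Int) from by ring,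
      show -(-(n : Int) - 1) - 1 = (n : Int) from by ring]
    rw [show -((m ||| n : Nat) : Int) - 1 = -(((m ||| n : Nat) : Int)) - 1 from rfl, pvBit_neg,
      pvBit_neg, pvBit_neg, Nat.testBit_or]
    cases m.testBit i <;> cases n.testBit i <;> rfl

theorem pvBit_bor (a b : Int) (i : Nat) :
    pvBit (PySem.Int.bor a b) i = (pvBit a i || pvBit b i) := by
  unfold PySem.Int.bor
  by_cases ha : 0 ≤ a <;> by_cases hb : 0 ≤ b
  · obtain ⟨m, rfl⟩ := pv_nonneg_form a ha
    obtain ⟨n, rfl⟩ := pv_nonneg_form b hb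
    simp [ha, hb, pvBit_natCast, Nat.testBit_or]
  · obtain ⟨m, rfl⟩ := pv_nonneg_form a ha
    obtain ⟨n, rfl⟩ := pv_neg_form b hb
    simp only [ha, hb, if_true, if_false, Int.toNat_natCast,
      show -(-(n : Int) - 1) - 1 = (n : Int) from by ring, pv_sub_and_eq_ldiff]
    rw [show -((n.ldiff m : Nat) : Int) - 1 = -(((n.ldiff m : Nat) : Int)) - 1 from rfl, pvBit_neg,
      pvBit_natCast, pvBit_neg, Nat.testBit_ldiff]
    cases m.testBit i <;> cases n.testBit i <;> rfl
  · obtain ⟨m, rfl⟩ := pv_neg_form a ha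
    obtain ⟨n, rfl⟩ := pv_nonneg_form b hb
    simp only [ha, hb, if_true, if_false, Int.toNat_natCast,
      show -(-(m : Int) - 1) - 1 = (m : Int) from by ring, pv_sub_and_eq_ldiff]
    rw [show -((m.ldiff n : Nat) : Int) - 1 = -(((m.ldiff n : Nat) : Int)) - 1 from rfl, pvBit_neg,
      pvBit_neg, pvBit_natCast, Nat.testBit_ldiff]
    cases m.testBit i <;> cases n.testBit i <;> rfl
  · obtain ⟨m, rfl⟩ := pv_neg_form a ha
    obtain ⟨n, rfl⟩ := pv_neg_form b hb
    simp only [ha, hb, if_true, if_false, Int.toNat_natCast,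
      show -(-(m : Int) - 1) - 1 = (m : Int) from by ring,
      show -(-(n : Int) - 1) - 1 = (n : Int) from by ring]
    rw [show -((m &&& n : Nat) : Int) - 1 = -(((m &&& n : Nat) : Int)) - 1 from rfl, pvBit_neg,
      pvBit_neg, pvBit_neg, Nat.testBit_and]
    cases m.testBit i <;> cases n.testBit i <;> rfl

theorem pvBit_bxor (a b : Int) (i : Nat) :
    pvBit (PySem.Int.bxor a b) i = (pvBit a i != pvBit b i) := by
  unfold PySem.Int.bxor
  by_cases ha : 0 ≤ a <;> by_cases hb : 0 ≤ b
  · obtain ⟨m, rfl⟩ := pv_nonneg_form a ha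
    obtain ⟨n, rfl⟩ := pv_nonneg_form b hb
    simp [ha, hb, pvBit_natCast, Nat.testBit_xor]
  · obtain ⟨m, rfl⟩ := pv_nonneg_form a ha
    obtain ⟨n, rfl⟩ := pv_neg_form b hb
    simp only [ha, hb, if_true, if_false, Int.toNat_natCast,
      show -(-(n : Int) - 1) - 1 = (n : Int) from by ring]
    rw [show -((m ^^^ n : Nat) : Int) - 1 = -(((m ^^^ n : Nat) : Int)) - 1 from rfl, pvBit_neg,
      pvBit_natCast, pvBit_neg, Nat.testBit_xor]
    cases m.testBit i <;> cases n.testBit i <;> rfl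
  · obtain ⟨m, rfl⟩ := pv_neg_form a ha
    obtain ⟨n, rfl⟩ := pv_nonneg_form b hb
    simp only [ha, hb, if_true, if_false, Int.toNat_natCast,
      show -(-(m : Int) - 1) - 1 = (m : Int) from by ring]
    rw [show -((m ^^^ n : Nat) : Int) - 1 = -(((m ^^^ n : Nat) : Int)) - 1 from rfl, pvBit_neg,
      pvBit_neg, pvBit_natCast, Nat.testBit_xor]
    cases m.testBit i <;> cases n.testBit i <;> rfl
  · obtain ⟨m, rfl⟩ := pv_neg_form a ha
    obtain ⟨n, rfl⟩ := pv_neg_form b hb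
    simp only [ha, hb, if_true, if_false, Int.toNat_natCast,
      show -(-(m : Int) - 1) - 1 = (m : Int) from by ring,
      show -(-(n : Int) - 1) - 1 = (n : Int) from by ring,
      pvBit_natCast, pvBit_neg, Nat.testBit_xor]
    cases m.testBit i <;> cases n.testBit i <;> rfl

theorem pv_foldl_pair_fst : ∀ (rest : List Int) (x y : Int),
    (rest.foldl (fun (p : Int × Int) n => (PySem.Int.bor p.1 n, PySem.Int.band p.2 n)) (x, y)).1
      = rest.foldl PySem.Int.bor x := by
  intro rest
  induction rest with
  | nil => intro x y; rfl
  | cons n t ih => intro x y; simpa using ih (PySem.Int.bor x n) (PySem.Int.band y n)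

theorem pv_foldl_pair_snd : ∀ (rest : List Int) (x y : Int),
    (rest.foldl (fun (p : Int × Int) n => (PySem.Int.bor p.1 n, PySem.Int.band p.2 n)) (x, y)).2
      = rest.foldl PySem.Int.band y := by
  intro rest
  induction rest with
  | nil => intro x y; rfl
  | cons n t ih => intro x y; simpa using ih (PySem.Int.bor x n) (PySem.Int.band y n)

theorem pvBit_foldl_bor (i : Nat) : ∀ (rest : List Int) (x : Int),
    pvBit (rest.foldl PySem.Int.bor x) i = (x :: rest).any (fun n => pvBit n i) := by
  intro rest
  induction rest with
  | nil => intro x; simp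
  | cons n t ih =>
    intro x
    rw [List.foldl_cons, ih (PySem.Int.bor x n)]
    simp [pvBit_bor, Bool.or_assoc]

theorem pvBit_foldl_band (i : Nat) : ∀ (rest : List Int) (x : Int),
    pvBit (rest.foldl PySem.Int.band x) i = (x :: rest).all (fun n => pvBit n i) := by
  intro rest
  induction rest with
  | nil => intro x; simp
  | cons n t ih =>
    intro x
    rw [List.foldl_cons, ih (PySem.Int.band x n)]
    simp [pvBit_band, Bool.and_assoc]

theorem pv_elem_bit (n : Int) (i : Nat) : (PySem.Int.band (n >>> i) 1 == 1) = pvBit n i := by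
  rw [pvBit, PySem.Int.band_one, PySem.Int.mod_eq_emod_of_pos (by omega : (0:Int) < 2),
    Int.shiftRight_eq_div_pow]
  norm_cast

-- A's per-position condition is the negation of bit i of OR ^ AND
theorem pv_digit_cond (x : Int) (rest : List Int) (i : Nat) :
    ((x :: rest).all (fun n => pvBit n i) || !((x :: rest).any (fun n => pvBit n i)))
      = !(pvBit (PySem.Int.bxor (rest.foldl PySem.Int.bor x) (rest.foldl PySem.Int.band x)) i) := by
  rw [pvBit_bxor, pvBit_foldl_bor, pvBit_foldl_band]
  simp only [List.all_cons, List.any_cons]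
  cases pvBit x i <;> cases (rest.all fun n => pvBit n i) <;> cases (rest.any fun n => pvBit n i) <;> rfl

theorem pv_band_mask (X : Int) (n : Nat) : PySem.Int.band X (2 ^ n - 1) = X % 2 ^ n := by
  have hpow : (1:Nat) ≤ 2 ^ n := Nat.one_le_two_pow
  have hcast : ((2:Int) ^ n - 1) = ((2 ^ n - 1 : Nat) : Int) := by push_cast [hpow]; ring
  by_cases hX : 0 ≤ X
  · obtain ⟨m, rfl⟩ := pv_nonneg_form X hX
    rw [hcast, PySem.Int.band_natCast, Nat.and_two_pow_sub_one_eq_mod]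
    push_cast; ring
  · obtain ⟨m, rfl⟩ := pv_neg_form X hX
    have hmod := Nat.mod_lt m (y := 2 ^ n) (by omega)
    rw [hcast, (pv_neg_ediv (m : Int) (2 ^ n) (by positivity)).2]
    unfold PySem.Int.band
    simp only [hX, if_false, Int.natCast_nonneg, if_true,
      show -(-(m : Int) - 1) - 1 = (m : Int) from by ring, Int.toNat_natCast]
    rw [Nat.and_comm, Nat.and_two_pow_sub_one_eq_mod]
    have : ((m : Int)) % ((2:Int) ^ n) = ((m % 2 ^ n : Nat) : Int) := by push_cast; ring
    rw [this]
    omega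

theorem pv_emod_succ (X : Int) (k : Nat) :
    X % 2 ^ (k + 1) = (if pvBit X k then 1 else 0) * 2 ^ k + X % 2 ^ k := by
  have hNpos : (0:Int) < 2 ^ k := by positivity
  have h1 := Int.ediv_add_emod X (2 ^ k)
  have hq := Int.ediv_add_emod (X / 2 ^ k) 2
  have hr1 : 0 ≤ X % 2 ^ k := Int.emod_nonneg X (by omega)
  have hr2 : X % 2 ^ k < 2 ^ k := Int.emod_lt_of_pos X hNpos
  have hq2 : (X / 2 ^ k) % 2 = 0 ∨ (X / 2 ^ k) % 2 = 1 := by omega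
  have h2 : X % 2 ^ (k + 1)
      = (2 ^ k * ((X / 2 ^ k) % 2) + X % 2 ^ k) % (2 ^ (k + 1)) := by
    conv_lhs => rw [← h1]
    have : 2 ^ k * (X / 2 ^ k) + X % 2 ^ k
        = (2 ^ k * ((X / 2 ^ k) % 2) + X % 2 ^ k) + 2 ^ (k + 1) * ((X / 2 ^ k) / 2) := by
      rw [pow_succ]; linear_combination (-(2:Int) ^ k) * hq
    rw [this, Int.add_mul_emod_self_left]
  rw [h2, Int.emod_eq_of_lt (by rcases hq2 with h | h <;> rw [h] <;> omega)
    (by rw [pow_succ]; rcases hq2 with h | h <;> rw [h] <;> omega)]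
  unfold pvBit
  rcases hq2 with h | h <;> rw [h] <;> simp <;> ring

theorem pv_parse_aux : ∀ (cs : List Char) (a : Int),
    cs.foldl (fun acc c => 2 * acc + (if c = '1' then 1 else 0)) a
      = a * 2 ^ cs.length
        + cs.foldl (fun acc c => 2 * acc + (if c = '1' then 1 else 0)) 0 := by
  intro cs
  induction cs with
  | nil => intro a; simp
  | cons c t ih =>
    intro a
    rw [List.foldl_cons, ih, List.foldl_cons, ih (2 * 0 + (if c = '1' then 1 else 0))]
    simp only [List.length_cons, pow_succ]
    ring

theorem pv_parse_cons (c : Char) (t : List Char) :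
    pvIntOfBin (c :: t) = (if c = '1' then 1 else 0) * 2 ^ t.length + pvIntOfBin t := by
  unfold pvIntOfBin
  rw [List.foldl_cons, pv_parse_aux]
  ring

theorem pvStepA_length (ls : List Int) (res : List Char) (i : Int) :
    (pvStepA ls res i).length = res.length + 1 := by
  simp only [pvStepA]
  split <;> simp

theorem pv_loop_length (ls : List Int) : ∀ (k : Nat),
    ((PySem.List.pyRange 0 (k : Int)).foldl (pvStepA ls) []).length = k := by
  intro k
  induction k with
  | zero => rw [PySem.List.pyRange_one_eq_nil (by omega)]; rfl
  | succ k ih =>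
    rw [show ((k + 1 : Nat) : Int) = (k : Int) + 1 from by push_cast; ring,
      PySem.List.pyRange_one_succ_right (by omega), List.foldl_append, List.foldl_cons,
      List.foldl_nil, pvStepA_length, ih]

theorem pv_loop_nil_parse : ∀ (k : Nat),
    pvIntOfBin ((PySem.List.pyRange 0 (k : Int)).foldl (pvStepA []) []) = 0 := by
  intro k
  induction k with
  | zero => rw [PySem.List.pyRange_one_eq_nil (by omega)]; rfl
  | succ k ih =>
    rw [show ((k + 1 : Nat) : Int) = (k : Int) + 1 from by push_cast; ring,
      PySem.List.pyRange_one_succ_right (by omega), List.foldl_append, List.foldl_cons,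
      List.foldl_nil, pvStepA, show (([] : List Int).map
        (fun n : Int => PySem.Int.band (n >>> ((k:Int)).toNat) 1 == 1)) = [] from rfl]
    simp [pv_parse_cons, ih]

theorem pv_main (x : Int) (rest : List Int) : ∀ (k : Nat),
    pvIntOfBin ((PySem.List.pyRange 0 (k : Int)).foldl (pvStepA (x :: rest)) [])
      = PySem.Int.bxor (rest.foldl PySem.Int.bor x) (rest.foldl PySem.Int.band x) % 2 ^ k := by
  intro k
  induction k with
  | zero => rw [PySem.List.pyRange_one_eq_nil (by omega)]; simp [pvIntOfBin]
  | succ k ih =>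
    rw [show ((k + 1 : Nat) : Int) = (k : Int) + 1 from by push_cast; ring,
      PySem.List.pyRange_one_succ_right (by omega), List.foldl_append, List.foldl_cons,
      List.foldl_nil, pvStepA]
    simp only [List.all_map, List.any_map, Function.comp_def, Int.toNat_natCast, pv_elem_bit]
    rw [show ((x :: rest).all (fun n => pvBit n k) || !((x :: rest).any (fun n => pvBit n k)))
        = !(pvBit (PySem.Int.bxor (rest.foldl PySem.Int.bor x) (rest.foldl PySem.Int.band x)) k)
      from pv_digit_cond x rest k]
    rw [pv_emod_succ _ k, ← ih]
    cases hbit : pvBit (PySem.Int.bxor (rest.foldl PySem.Int.bor x) (rest.foldl PySem.Int.band x)) k <;>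
      simp [pv_parse_cons, pv_loop_length (x :: rest) k] <;> ring

-- ===== VERDICT (by name: the statement is the Claim_ definition above) =====
theorem bitequal_spec : Claim_equal_bitequal := by
  intro ls n_bits _ hP
  unfold Spec_bitequal
  unfold Pre_bitequal at hP
  obtain ⟨k, rfl⟩ : ∃ k : Nat, n_bits = (k : Int) := ⟨n_bits.toNat, by omega⟩
  cases ls with
  | nil =>
    simp only [bitequal, bitequal_alt]
    exact pv_loop_nil_parse k
  | cons x rest =>
    simp only [bitequal, bitequal_alt]
    rw [pv_main x rest k, pv_foldl_pair_fst, pv_foldl_pair_snd, Int.toNat_natCast,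
      Int.shiftLeft_eq, one_mul, pv_band_mask]
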